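-- pv_equiv track=rewrite | github.com/BrunoGeorgevich/Interactive-ConceptGraphs | labs/vectorial_db.py | generate_unique_room_names
-- ===== SOURCE A (Python) =====
-- def generate_unique_room_names(merged_regions: dict) -> dict:
--     """
--     Generates unique room names based on class types and occurrence count.
--
--     :param merged_regions: Dictionary of merged region data.
--     :type merged_regions: dict
--     :return: Mapping of region IDs to unique room names.
--     :rtype: dict
--     """
--     id_to_name = {}
--     class_counters = {}
--     sorted_ids = sorted(list(merged_regions.keys()))
--
--     for rid in sorted_ids:
--         data = merged_regions[rid]
--         base_class = data.get("dominant_class", "unknown")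
--
--         if base_class not in class_counters:
--             class_counters[base_class] = 1
--         else:
--             class_counters[base_class] += 1
--
--         unique_name = f"{base_class} {class_counters[base_class]}"
--         id_to_name[rid] = unique_name
--
--     return id_to_name
-- ===== SOURCE B (Python) =====
-- def generate_unique_room_names(merged_regions: dict) -> dict:
--     """Stateless re-derivation: each region's number is 1 + the count of
--     smaller-id regions with the same resolved class, read off in one comprehension."""
--     def cls(rid):
--         return merged_regions[rid].get("dominant_class", "unknown")
--
--     ids = sorted(merged_regions)
--     return {
--         r: f"{cls(r)} {1 + sum(1 for o in ids if o < r and cls(o) == cls(r))}"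
--         for r in ids
--     }
-- ===== Notes on version B (the rewrite author's own statement) =====
-- stated objective: simpler
-- what changed: Replaced the stateful loop that threads a per-class counter dict and builds the mapping incrementally by a single stateless comprehension: each region's number is computed directly as 1 + the count of smaller-id regions with the same resolved class.
import Mathlib
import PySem

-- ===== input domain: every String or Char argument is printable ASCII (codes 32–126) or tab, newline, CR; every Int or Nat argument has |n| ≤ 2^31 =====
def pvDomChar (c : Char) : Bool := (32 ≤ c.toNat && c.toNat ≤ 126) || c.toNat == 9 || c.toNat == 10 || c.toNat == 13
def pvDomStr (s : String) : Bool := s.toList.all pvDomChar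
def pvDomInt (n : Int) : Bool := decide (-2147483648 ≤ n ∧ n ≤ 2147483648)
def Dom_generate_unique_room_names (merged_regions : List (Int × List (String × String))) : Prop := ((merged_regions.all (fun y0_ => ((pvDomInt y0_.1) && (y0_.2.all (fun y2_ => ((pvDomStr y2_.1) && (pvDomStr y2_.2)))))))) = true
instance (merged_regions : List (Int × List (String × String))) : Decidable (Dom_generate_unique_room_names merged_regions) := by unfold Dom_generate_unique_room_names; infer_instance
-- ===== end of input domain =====

-- B replaces A's stateful per-class counter loop by a stateless comprehension
-- (number = 1 + count of smaller-id same-class regions); objective: simpler.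

-- ===== PORT A =====
-- the body of A's for-loop, as a helper (literal: data = merged_regions[rid] — rid
-- comes from the keys, so the lookup succeeds and [rid] is ported as get? + getD [])
def pvStepA (merged_regions : List (Int × List (String × String)))
    (st : PySem.Dict Int String × PySem.Dict String Int) (rid : Int) :
    PySem.Dict Int String × PySem.Dict String Int :=
  let data := ((PySem.Dict.mk merged_regions).get? rid).getD []
  let base_class := (PySem.Dict.mk data).getD "dominant_class" "unknown"
  let counters :=
    match st.2.get? base_class with
    | none => st.2.insert base_class 1
    | some c => st.2.insert base_class (c + 1)
  let unique_name := base_class ++ " " ++ PySem.Int.toStr (counters.getD base_class 0)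
  (st.1.insert rid unique_name, counters)

def generate_unique_room_names (merged_regions : List (Int × List (String × String))) : List (Int × String) :=
  let sorted_ids := PySem.List.sorted (PySem.Dict.mk merged_regions).keys (fun x => x) false
  (sorted_ids.foldl (pvStepA merged_regions) (PySem.Dict.empty, PySem.Dict.empty)).1.items

-- ===== PORT B =====
-- cls(rid) of Source B: merged_regions[rid].get("dominant_class", "unknown")
def pvCls (merged_regions : List (Int × List (String × String))) (rid : Int) : String :=
  (PySem.Dict.mk (((PySem.Dict.mk merged_regions).get? rid).getD [])).getD "dominant_class" "unknown"

def generate_unique_room_names_alt (merged_regions : List (Int × List (String × String))) : List (Int × String) :=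
  let ids := PySem.List.sorted (PySem.Dict.mk merged_regions).keys (fun x => x) false
  ids.map (fun r =>
    (r, pvCls merged_regions r ++ " " ++
        PySem.Int.toStr (1 + (ids.countP (fun o =>
          decide (o < r) && (pvCls merged_regions o == pvCls merged_regions r)) : Int))))

-- ===== PRECONDITION & SPEC =====
-- Pre_ excludes association lists with duplicate keys, which do not represent any
-- Python dict (every dict serialises to a duplicate-free association list).
def Pre_generate_unique_room_names (merged_regions : List (Int × List (String × String))) : Prop :=
  (merged_regions.map Prod.fst).Nodup
instance (merged_regions : List (Int × List (String × String))) : Decidable (Pre_generate_unique_room_names merged_regions) := by unfold Pre_generate_unique_room_names; infer_instance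

def pvWitness_generate_unique_room_names : (List (Int × List (String × String))) :=
  [(2, [("dominant_class", "room")]), (1, [("dominant_class", "room")]), (3, [])]

def Spec_generate_unique_room_names (merged_regions : List (Int × List (String × String))) (out : List (Int × String)) : Prop := out = generate_unique_room_names_alt merged_regions
instance (merged_regions : List (Int × List (String × String))) (out : List (Int × String)) : Decidable (Spec_generate_unique_room_names merged_regions out) := by unfold Spec_generate_unique_room_names; infer_instance

-- ===== CLAIM (what is proved, stated in full; the proofs are below) =====
def Claim_equal_generate_unique_room_names : Prop := ∀ (merged_regions : List (Int × List (String × String))), Dom_generate_unique_room_names merged_regions → Pre_generate_unique_room_names merged_regions → Spec_generate_unique_room_names merged_regions (generate_unique_room_names merged_regions)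

-- ===== LEMMAS AND PROOFS =====

theorem pvStepA_fst (merged_regions : List (Int × List (String × String)))
    (acc : PySem.Dict Int String) (cnt : PySem.Dict String Int) (r : Int) :
    (pvStepA merged_regions (acc, cnt) r).1
      = acc.insert r (pvCls merged_regions r ++ " " ++
          PySem.Int.toStr (cnt.getD (pvCls merged_regions r) 0 + 1)) := by
  simp only [pvStepA, pvCls, PySem.Dict.getD_eq_get?_getD]
  rcases h : cnt.get? (((PySem.Dict.mk (((PySem.Dict.mk merged_regions).get? r).getD [])).get? "dominant_class").getD "unknown") with _ | c
  · simp
  · simp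

theorem pvStepA_snd_getD (merged_regions : List (Int × List (String × String)))
    (acc : PySem.Dict Int String) (cnt : PySem.Dict String Int) (r : Int) (s : String) :
    (pvStepA merged_regions (acc, cnt) r).2.getD s 0
      = if s = pvCls merged_regions r then cnt.getD (pvCls merged_regions r) 0 + 1
        else cnt.getD s 0 := by
  simp only [pvStepA, pvCls, PySem.Dict.getD_eq_get?_getD]
  rcases h : cnt.get? (((PySem.Dict.mk (((PySem.Dict.mk merged_regions).get? r).getD [])).get? "dominant_class").getD "unknown") with _ | c
  · rw [PySem.Dict.get?_insert]
    split_ifs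
    · simp
    · rfl
  · rw [PySem.Dict.get?_insert]
    split_ifs
    · simp
    · rfl


theorem loopA_items
    (merged_regions : List (Int × List (String × String)))
    (l : List Int) (acc : PySem.Dict Int String) (cnt : PySem.Dict String Int)
    (hl : l.Pairwise (· < ·)) (hacc : ∀ r ∈ l, acc.contains r = false) :
    (l.foldl (pvStepA merged_regions) (acc, cnt)).1.items
    = acc.items ++ l.map (fun r =>
        (r, pvCls merged_regions r ++ " " ++
            PySem.Int.toStr (cnt.getD (pvCls merged_regions r) 0 + 1 +
              (l.countP (fun o =>
                decide (o < r) && (pvCls merged_regions o == pvCls merged_regions r)) : Int)))) := by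
  induction l generalizing acc cnt with
  | nil => simp
  | cons r0 t ih =>
    obtain ⟨hr0, hlt⟩ := List.pairwise_cons.mp hl
    have hstep : pvStepA merged_regions (acc, cnt) r0 =
        ((pvStepA merged_regions (acc, cnt) r0).1, (pvStepA merged_regions (acc, cnt) r0).2) := rfl
    have haccnew : ∀ r ∈ t, (pvStepA merged_regions (acc, cnt) r0).1.contains r = false := by
      intro r hr
      rw [pvStepA_fst, PySem.Dict.contains_insert]
      have hne : (r == r0) = false := by simpa using (ne_of_gt (hr0 r hr))
      simp [hne, hacc r (List.mem_cons_of_mem _ hr)]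
    -- head element: nothing in r0 :: t is strictly below r0
    have hc0 : t.countP (fun o =>
        decide (o < r0) && (pvCls merged_regions o == pvCls merged_regions r0)) = 0 := by
      rw [List.countP_eq_zero]
      intro o ho
      simp [not_lt.mpr (le_of_lt (hr0 o ho))]
    have hhead : (r0, pvCls merged_regions r0 ++ " " ++
        PySem.Int.toStr (cnt.getD (pvCls merged_regions r0) 0 + 1))
        = (r0, pvCls merged_regions r0 ++ " " ++
            PySem.Int.toStr (cnt.getD (pvCls merged_regions r0) 0 + 1 +
              ((r0 :: t).countP (fun o =>
                decide (o < r0) && (pvCls merged_regions o == pvCls merged_regions r0)) : Int))) := by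
      simp [hc0]
    -- tail: the stepped counter accounts exactly for r0's contribution to the count
    have htail : t.map (fun r =>
        (r, pvCls merged_regions r ++ " " ++
            PySem.Int.toStr ((pvStepA merged_regions (acc, cnt) r0).2.getD (pvCls merged_regions r) 0 + 1 +
              (t.countP (fun o =>
                decide (o < r) && (pvCls merged_regions o == pvCls merged_regions r)) : Int))))
        = t.map (fun r =>
        (r, pvCls merged_regions r ++ " " ++
            PySem.Int.toStr (cnt.getD (pvCls merged_regions r) 0 + 1 +
              ((r0 :: t).countP (fun o =>
                decide (o < r) && (pvCls merged_regions o == pvCls merged_regions r)) : Int)))) := by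
      apply List.map_congr_left
      intro r hr
      have hlt0 : r0 < r := hr0 r hr
      have harg : (pvStepA merged_regions (acc, cnt) r0).2.getD (pvCls merged_regions r) 0 + 1 +
          (t.countP (fun o =>
            decide (o < r) && (pvCls merged_regions o == pvCls merged_regions r)) : Int)
          = cnt.getD (pvCls merged_regions r) 0 + 1 +
          ((r0 :: t).countP (fun o =>
            decide (o < r) && (pvCls merged_regions o == pvCls merged_regions r)) : Int) := by
        rw [pvStepA_snd_getD, List.countP_cons]
        by_cases hcls : pvCls merged_regions r0 = pvCls merged_regions r
        · have hp : (decide (r0 < r) && (pvCls merged_regions r0 == pvCls merged_regions r)) = true := by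
            simp [hlt0, hcls]
          rw [if_pos hcls.symm, hp, hcls]
          simp
          omega
        · have hp : (decide (r0 < r) && (pvCls merged_regions r0 == pvCls merged_regions r)) = false := by
            simp [hcls]
          rw [if_neg (fun h => hcls h.symm), hp]
          simp
      rw [harg]
    rw [List.foldl_cons, hstep, ih _ _ hlt haccnew, pvStepA_fst,
      PySem.Dict.items_insert_of_not_contains (h := hacc r0 List.mem_cons_self),
      List.append_assoc]
    simp only [List.map_cons, List.singleton_append]
    rw [hhead, htail]

-- ===== VERDICT (by name: the statement is the Claim_ definition above) =====
theorem generate_unique_room_names_spec : Claim_equal_generate_unique_room_names := by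
  intro mr _ hpre
  unfold Spec_generate_unique_room_names generate_unique_room_names generate_unique_room_names_alt
  have hkeys : (PySem.Dict.mk mr).keys.Nodup := by
    simpa [PySem.Dict.keys_mk] using hpre
  have hperm := PySem.List.sorted_perm (PySem.Dict.mk mr).keys (fun x => x) false
  have hnd : (PySem.List.sorted (PySem.Dict.mk mr).keys (fun x => x) false).Nodup :=
    hperm.nodup_iff.mpr hkeys
  have hle := PySem.List.sorted_pairwise (PySem.Dict.mk mr).keys (fun x => x)
  have hlt : (PySem.List.sorted (PySem.Dict.mk mr).keys (fun x => x) false).Pairwise (· < ·) :=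
    (hle.and hnd).imp (fun h => lt_of_le_of_ne h.1 h.2)
  rw [loopA_items mr _ _ _ hlt (by intro r _; simp [PySem.Dict.contains_empty])]
  simp [PySem.Dict.getD_empty,
    (show PySem.Dict.empty.items = ([] : List (Int × String)) from rfl)]
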